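-- pv_equiv track=rewrite | github.com/wongzbb/DiffMa-Diffusion-Mamba | tools.py | vmamba_
-- ===== SOURCE A (Python) =====
-- def zig1(n):
--     matrix = [[0] * n for _ in range(n)]
--     num = 1
--     for i in range(n):
--         if i % 2 == 0:
--             for j in range(n):
--                 matrix[i][j] = num
--                 num += 1
--         else:
--             for j in range(n-1, -1, -1):
--                 matrix[i][j] = num
--                 num += 1
--     return matrix
--
-- def zig2(n):
--     matrix = [[0] * n for _ in range(n)]
--     num = 1
--     for j in range(n):
--         if j % 2 == 0:
--             for i in range(n):
--                 matrix[i][j] = num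
--                 num += 1
--         else:
--             for i in range(n-1, -1, -1):
--                 matrix[i][j] = num
--                 num += 1
--     return matrix
--
-- def zig5(n):
--     matrix = zig1(n)
--     matrix = matrix[::-1]
--     return matrix
--
-- def zig6(n):
--     matrix = zig2(n)
--     matrix = matrix[::-1]
--     return matrix
--
-- def zig7(n):
--     matrix = zig5(n)
--     matrix = [col[::-1] for col in matrix]
--     return matrix
--
-- def zig8(n):
--     matrix = zig6(n)
--     matrix = [col[::-1] for col in matrix]
--     return matrix
--
-- def vmamba_(n: int):
--     m_list = []
--     m_list.append(zig1(n))
--     m_list.append(zig2(n))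
--     m_list.append(zig7(n))
--     m_list.append(zig8(n))
--
--     order_list = []
--     original_list = []
--
--     for m in m_list:
--         rearrange_list = []
--         for row in m:
--             for num in row:
--                 rearrange_list.append(num-1)
--         order_list.append(rearrange_list)
--
--         index_mapping = {index: i for i, index in enumerate(rearrange_list)}
--         original_order_indexes = [index_mapping[i] for i in range(len(rearrange_list))]
--
--         original_list.append(original_order_indexes)
--
--     return order_list, original_list
-- ===== SOURCE B (Python) =====
-- def vmamba_(n: int):
--     # B: build each pattern's walk sequence directly (no n x n matrix, no dict),
--     # then invert each walk with one scatter loop.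
--     w1 = []
--     for i in range(n):
--         if i % 2 == 0:
--             for j in range(n):
--                 w1.append(i * n + j)
--         else:
--             for j in range(n - 1, -1, -1):
--                 w1.append(i * n + j)
--     w2 = []
--     for j in range(n):
--         if j % 2 == 0:
--             for i in range(n):
--                 w2.append(i * n + j)
--         else:
--             for i in range(n - 1, -1, -1):
--                 w2.append(i * n + j)
--     t = n * n - 1
--     walks = [w1, w2, [t - p for p in w1], [t - p for p in w2]]
--     order_list = []
--     original_list = []
--     for seq in walks:
--         order = [0] * len(seq)
--         for k, p in enumerate(seq):
--             order[p] = k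
--         order_list.append(order)
--         original_list.append(seq)
--     return order_list, original_list
-- ===== Notes on version B (the rewrite author's own statement) =====
-- stated objective: alternative
-- what changed: B generates each zigzag scan as a flat walk sequence directly (appending row-major indices i*n+j in visiting order, with the two 180-degree-rotated patterns obtained as n*n-1-p from the first two walks) and builds each inverse permutation with a single scatter loop order[p]=k, whereas A constructs four n-by-n matrices cell by cell, flattens them, and inverts via a dict comprehension plus per-index lookups.
import Mathlib
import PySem

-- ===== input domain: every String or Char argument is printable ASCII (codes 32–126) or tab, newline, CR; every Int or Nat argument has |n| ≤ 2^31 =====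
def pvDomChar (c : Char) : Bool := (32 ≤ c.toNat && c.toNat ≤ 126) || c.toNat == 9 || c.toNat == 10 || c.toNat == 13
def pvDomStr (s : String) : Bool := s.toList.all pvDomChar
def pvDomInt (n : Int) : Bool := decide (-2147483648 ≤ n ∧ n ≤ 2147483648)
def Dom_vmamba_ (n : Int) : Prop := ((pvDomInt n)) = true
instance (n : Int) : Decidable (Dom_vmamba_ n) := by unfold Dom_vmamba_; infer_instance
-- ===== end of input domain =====

-- B builds each zigzag walk directly as a flat index sequence and inverts it with one
-- scatter loop, instead of A's n×n matrix construction plus dict-based inversion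
-- (objective: alternative decomposition, same exact results).

-- ===== PORT A =====
-- matrix[i][j] = v  (indices nonneg and in range wherever A executes this)
def pvSetCell (m : List (List Int)) (i j v : Int) : List (List Int) :=
  PySem.List.pySetD m i (PySem.List.pySetD (PySem.List.pyGetD m i []) j v)

def pvZig1 (n : Int) : List (List Int) :=
  let m0 : List (List Int) := (PySem.List.pyRange 0 n 1).map (fun _ => PySem.List.pyRepeat [(0 : Int)] n)
  let st := (PySem.List.pyRange 0 n 1).foldl (fun (st : List (List Int) × Int) i =>
    if PySem.Int.mod i 2 == 0 then
      (PySem.List.pyRange 0 n 1).foldl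
        (fun (st2 : List (List Int) × Int) j => (pvSetCell st2.1 i j st2.2, st2.2 + 1)) st
    else
      (PySem.List.pyRange (n - 1) (-1) (-1)).foldl
        (fun (st2 : List (List Int) × Int) j => (pvSetCell st2.1 i j st2.2, st2.2 + 1)) st) (m0, 1)
  st.1

def pvZig2 (n : Int) : List (List Int) :=
  let m0 : List (List Int) := (PySem.List.pyRange 0 n 1).map (fun _ => PySem.List.pyRepeat [(0 : Int)] n)
  let st := (PySem.List.pyRange 0 n 1).foldl (fun (st : List (List Int) × Int) j =>
    if PySem.Int.mod j 2 == 0 then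
      (PySem.List.pyRange 0 n 1).foldl
        (fun (st2 : List (List Int) × Int) i => (pvSetCell st2.1 i j st2.2, st2.2 + 1)) st
    else
      (PySem.List.pyRange (n - 1) (-1) (-1)).foldl
        (fun (st2 : List (List Int) × Int) i => (pvSetCell st2.1 i j st2.2, st2.2 + 1)) st) (m0, 1)
  st.1

-- matrix[::-1] ; slice? with step -1 never raises, so getD [] is exact
def pvRev (xs : List (List Int)) : List (List Int) := (PySem.List.slice? xs none none (-1)).getD []
def pvRevRow (xs : List Int) : List Int := (PySem.List.slice? xs none none (-1)).getD []

def pvZig5 (n : Int) : List (List Int) := pvRev (pvZig1 n)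
def pvZig6 (n : Int) : List (List Int) := pvRev (pvZig2 n)
def pvZig7 (n : Int) : List (List Int) := (pvZig5 n).map pvRevRow
def pvZig8 (n : Int) : List (List Int) := (pvZig6 n).map pvRevRow

def vmamba_ (n : Int) : List (List Int) × List (List Int) :=
  let mList := [pvZig1 n, pvZig2 n, pvZig7 n, pvZig8 n]
  mList.foldl (fun (acc : List (List Int) × List (List Int)) m =>
    let rearrange := m.foldl (fun r row => row.foldl (fun r2 num => r2 ++ [num - 1]) r) []
    let d := (PySem.List.enumerate rearrange 0).foldl
      (fun (d : PySem.Dict Int Int) p => d.insert p.2 p.1) PySem.Dict.empty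
    -- index_mapping[i]: the key is always present (rearrange is a permutation of 0..len-1), so getD is exact
    let original := (PySem.List.pyRange 0 (PySem.List.len rearrange) 1).map (fun i => d.getD i 0)
    (acc.1 ++ [rearrange], acc.2 ++ [original])) ([], [])

-- ===== PORT B =====
def vmamba__alt (n : Int) : List (List Int) × List (List Int) :=
  let w1 := (PySem.List.pyRange 0 n 1).foldl (fun w i =>
    if PySem.Int.mod i 2 == 0 then
      (PySem.List.pyRange 0 n 1).foldl (fun w j => w ++ [i * n + j]) w
    else
      (PySem.List.pyRange (n - 1) (-1) (-1)).foldl (fun w j => w ++ [i * n + j]) w) []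
  let w2 := (PySem.List.pyRange 0 n 1).foldl (fun w j =>
    if PySem.Int.mod j 2 == 0 then
      (PySem.List.pyRange 0 n 1).foldl (fun w i => w ++ [i * n + j]) w
    else
      (PySem.List.pyRange (n - 1) (-1) (-1)).foldl (fun w i => w ++ [i * n + j]) w) []
  let t := n * n - 1
  let walks := [w1, w2, w1.map (fun p => t - p), w2.map (fun p => t - p)]
  walks.foldl (fun (acc : List (List Int) × List (List Int)) seq =>
    let order0 := PySem.List.pyRepeat [(0 : Int)] (PySem.List.len seq)
    let order := (PySem.List.enumerate seq 0).foldl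
      (fun o (p : Int × Int) => PySem.List.pySetD o p.2 p.1) order0
    (acc.1 ++ [order], acc.2 ++ [seq])) ([], [])


-- ===== PRECONDITION & SPEC =====
def Spec_vmamba_ (n : Int) (out : List (List Int) × List (List Int)) : Prop := out = vmamba__alt n
instance (n : Int) (out : List (List Int) × List (List Int)) : Decidable (Spec_vmamba_ n out) := by unfold Spec_vmamba_; infer_instance

-- ===== CLAIM (what is proved, stated in full; the proofs are below) =====
def Claim_equal_vmamba_ : Prop := ∀ (n : Int), Dom_vmamba_ n → Spec_vmamba_ n (vmamba_ n)

-- ===== LEMMAS AND PROOFS =====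

-- cell index visited at step k of walk 1 (rows, boustrophedon); it is an involution
def pvG1 (N k : Nat) : Nat := (k / N) * N + (if (k / N) % 2 = 0 then k % N else N - 1 - k % N)
-- cell index visited at step k of walk 2 (columns, boustrophedon)
def pvG2 (N k : Nat) : Nat := (if (k / N) % 2 = 0 then k % N else N - 1 - k % N) * N + k / N
-- inverse of pvG2: the step at which walk 2 visits cell p
def pvI2 (N p : Nat) : Nat := (p % N) * N + (if (p % N) % 2 = 0 then p / N else N - 1 - p / N)


lemma pvDivMulAdd (N a b : Nat) (hb : b < N) : (a * N + b) / N = a ∧ (a * N + b) % N = b := by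
  have hN : 0 < N := Nat.pos_of_ne_zero (by omega)
  constructor
  · rw [mul_comm, Nat.mul_add_div hN]
    simp [Nat.div_eq_of_lt hb]
  · rw [mul_comm, Nat.mul_add_mod, Nat.mod_eq_of_lt hb]

lemma pvDivLt (N k : Nat) (hN : 0 < N) (hk : k < N * N) : k / N < N ∧ k % N < N :=
  ⟨(Nat.div_lt_iff_lt_mul hN).2 hk, Nat.mod_lt _ hN⟩


lemma pvIfBound (N b : Nat) (hN : 0 < N) (hb : b < N) (cond : Prop) [Decidable cond] :
    (if cond then b else N - 1 - b) < N := by split <;> omega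

lemma pvSubSub (N b : Nat) (hb : b < N) : N - 1 - (N - 1 - b) = b := by omega

lemma pvG1_eval (N a b : Nat) (hb : b < N) :
    pvG1 N (a * N + b) = a * N + (if a % 2 = 0 then b else N - 1 - b) := by
  obtain ⟨h1, h2⟩ := pvDivMulAdd N a b hb
  simp [pvG1, h1, h2]

lemma pvG1_lt (N k : Nat) (hN : 0 < N) (hk : k < N * N) : pvG1 N k < N * N := by
  obtain ⟨ha, hb⟩ := pvDivLt N k hN hk
  unfold pvG1
  have : (if (k / N) % 2 = 0 then k % N else N - 1 - k % N) < N := pvIfBound N _ hN hb _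
  calc k / N * N + (if (k / N) % 2 = 0 then k % N else N - 1 - k % N)
      < k / N * N + N := by omega
    _ = (k / N + 1) * N := by ring
    _ ≤ N * N := Nat.mul_le_mul_right N (by omega)

lemma pvG1_invol (N k : Nat) (hN : 0 < N) (hk : k < N * N) : pvG1 N (pvG1 N k) = k := by
  obtain ⟨ha, hb⟩ := pvDivLt N k hN hk
  have hrw : pvG1 N k = (k / N) * N + (if (k / N) % 2 = 0 then k % N else N - 1 - k % N) := rfl
  have hc : (if (k / N) % 2 = 0 then k % N else N - 1 - k % N) < N := pvIfBound N _ hN hb _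
  rw [hrw, pvG1_eval N _ _ hc]
  have hdm : k / N * N + k % N = k := by rw [mul_comm]; exact Nat.div_add_mod k N
  have hsub : N - 1 - (N - 1 - k % N) = k % N := pvSubSub N _ hb
  split_ifs <;> (try rw [hsub]) <;> exact hdm

lemma pvG2_eval (N a b : Nat) (ha : a < N) (hb : b < N) :
    pvG2 N (a * N + b) = (if a % 2 = 0 then b else N - 1 - b) * N + a := by
  obtain ⟨h1, h2⟩ := pvDivMulAdd N a b hb
  simp [pvG2, h1, h2]

lemma pvI2_eval (N a b : Nat) (hb : b < N) :
    pvI2 N (a * N + b) = b * N + (if b % 2 = 0 then a else N - 1 - a) := by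
  obtain ⟨h1, h2⟩ := pvDivMulAdd N a b hb
  simp [pvI2, h1, h2]

lemma pvG2_lt (N k : Nat) (hN : 0 < N) (hk : k < N * N) : pvG2 N k < N * N := by
  obtain ⟨ha, hb⟩ := pvDivLt N k hN hk
  unfold pvG2
  have : (if (k / N) % 2 = 0 then k % N else N - 1 - k % N) ≤ N - 1 := by
    have := pvIfBound N _ hN hb ((k / N) % 2 = 0); omega
  calc (if (k / N) % 2 = 0 then k % N else N - 1 - k % N) * N + k / N
      ≤ (N - 1) * N + k / N := by
        exact Nat.add_le_add_right (Nat.mul_le_mul_right N this) _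
    _ < (N - 1) * N + N := by omega
    _ = N * N := by
        have h1 := Nat.sub_mul N 1 N
        have h2 : N ≤ N * N := Nat.le_mul_of_pos_left N hN
        omega

lemma pvI2_lt (N p : Nat) (hN : 0 < N) (hp : p < N * N) : pvI2 N p < N * N := by
  obtain ⟨ha, hb⟩ := pvDivLt N p hN hp
  unfold pvI2
  have : (if (p % N) % 2 = 0 then p / N else N - 1 - p / N) < N := pvIfBound N _ hN ha _
  calc (p % N) * N + (if (p % N) % 2 = 0 then p / N else N - 1 - p / N)
      < (p % N) * N + N := by omega
    _ = (p % N + 1) * N := by ring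
    _ ≤ N * N := Nat.mul_le_mul_right N (by omega)

lemma pvI2_G2 (N k : Nat) (hN : 0 < N) (hk : k < N * N) : pvI2 N (pvG2 N k) = k := by
  obtain ⟨ha, hb⟩ := pvDivLt N k hN hk
  have hc : (if (k / N) % 2 = 0 then k % N else N - 1 - k % N) < N := pvIfBound N _ hN hb _
  have hrw : pvG2 N k = (if (k / N) % 2 = 0 then k % N else N - 1 - k % N) * N + k / N := rfl
  rw [hrw, pvI2_eval N _ _ ha]
  have hdm : k / N * N + k % N = k := by rw [mul_comm]; exact Nat.div_add_mod k N
  have hsub : N - 1 - (N - 1 - k % N) = k % N := pvSubSub N _ hb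
  split_ifs <;> (try rw [hsub]) <;> exact hdm

lemma pvG2_I2 (N p : Nat) (hN : 0 < N) (hp : p < N * N) : pvG2 N (pvI2 N p) = p := by
  obtain ⟨ha, hb⟩ := pvDivLt N p hN hp
  have hc : (if (p % N) % 2 = 0 then p / N else N - 1 - p / N) < N := pvIfBound N _ hN ha _
  have hrw : pvI2 N p = (p % N) * N + (if (p % N) % 2 = 0 then p / N else N - 1 - p / N) := rfl
  rw [hrw, pvG2_eval N _ _ hb hc]
  have hdm : p / N * N + p % N = p := by rw [mul_comm]; exact Nat.div_add_mod p N
  have hsub : N - 1 - (N - 1 - p / N) = p / N := pvSubSub N _ ha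
  split_ifs <;> (try rw [hsub]) <;> exact hdm

lemma pvRev_eq (xs : List (List Int)) : pvRev xs = xs.reverse := by
  simp [pvRev, PySem.List.slice?_none_none_neg_one]

lemma pvRevRow_eq (xs : List Int) : pvRevRow xs = xs.reverse := by
  simp [pvRevRow, PySem.List.slice?_none_none_neg_one]

lemma pvSetMapRange {α : Type} (N q : Nat) (hq : q < N) (f : Nat → α) (v : α) :
    ((List.range N).map f).set q v = (List.range N).map (fun p => if p = q then v else f p) := by
  apply List.ext_getElem
  · simp
  · intro p h1 h2
    simp only [List.getElem_set, List.getElem_map, List.getElem_range]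
    simp only [List.length_set, List.length_map, List.length_range] at h1
    by_cases h : p = q
    · simp [h]
    · simp only [if_neg h, if_neg (Ne.symm h)]

lemma pvEqMapRange {α : Type} (N : Nat) (d : α) (r : List α) (h : r.length = N) :
    r = (List.range N).map (fun p => r.getD p d) := by
  apply List.ext_getElem
  · simp [h]
  · intro p h1 h2
    simp [List.getD_eq_getElem?_getD, List.getElem?_eq_getElem h1]

lemma pvCounterFold {α : Type} (f : α → Nat → Int → α) (N : Nat) (M : α) (num : Int) :
    (List.range N).foldl (fun st k => (f st.1 k st.2, st.2 + 1)) (M, num)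
      = ((List.range N).foldl (fun m k => f m k (num + k)) M, num + N) := by
  induction N with
  | zero => simp
  | succ N ih =>
    rw [List.range_succ, List.foldl_append, List.foldl_append, ih]
    simp only [List.foldl_cons, List.foldl_nil]
    refine Prod.ext rfl ?_
    push_cast; ring

lemma pvMapRangeCongr {α : Type} (N : Nat) (f g : Nat → α) (h : ∀ p < N, f p = g p) :
    (List.range N).map f = (List.range N).map g :=
  List.map_congr_left (fun p hp => h p (List.mem_range.mp hp))

lemma pvScatterAux {α : Type} (N : Nat) (c d : Nat → Nat) (hc : ∀ k < N, c k < N)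
    (hcd : ∀ k < N, d (c k) = k) (hdc : ∀ p < N, c (d p) = p)
    (v : Nat → α) (f0 : Nat → α) (t : Nat) (ht : t ≤ N) :
    (List.range t).foldl (fun r k => r.set (c k) (v k)) ((List.range N).map f0)
      = (List.range N).map (fun p => if d p < t then v (d p) else f0 p) := by
  induction t with
  | zero => simp
  | succ t ih =>
    rw [List.range_succ, List.foldl_append, ih (by omega)]
    simp only [List.foldl_cons, List.foldl_nil]
    rw [pvSetMapRange N (c t) (hc t (by omega))]
    apply pvMapRangeCongr
    intro p hp
    by_cases h : p = c t
    · subst h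
      simp [hcd t (by omega)]
    · have hne : d p ≠ t := by
        intro hdp
        exact h ((hdp ▸ hdc p hp).symm)
      have : (p = c t) = False := by simp [h]
      simp only [this, if_false]
      by_cases h2 : d p < t
      · have h3 : d p < t + 1 := by omega
        simp [h2, h3]
      · have h3 : ¬ (d p < t + 1) := by omega
        simp [h2, h3]

lemma pvScatter {α : Type} (N : Nat) (c d : Nat → Nat) (hc : ∀ k < N, c k < N)
    (hcd : ∀ k < N, d (c k) = k) (hdc : ∀ p < N, c (d p) = p) (hd : ∀ p < N, d p < N)
    (v : Nat → α) (r0 : List α) (dflt : α) (h0 : r0.length = N) :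
    (List.range N).foldl (fun r k => r.set (c k) (v k)) r0
      = (List.range N).map (fun p => v (d p)) := by
  rw [pvEqMapRange N dflt r0 h0, pvScatterAux N c d hc hcd hdc v _ N le_rfl]
  exact pvMapRangeCongr _ _ _ (fun p hp => by simp [hd p hp])

lemma pvFlatMapRange {α : Type} (A B : Nat) (f : Nat → Nat → α) :
    (List.range A).flatMap (fun i => (List.range B).map (f i))
      = (List.range (A * B)).map (fun k => f (k / B) (k % B)) := by
  rcases Nat.eq_zero_or_pos B with hB | hB
  · subst hB; simp
  induction A with
  | zero => simp
  | succ A ih =>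
    rw [List.range_succ, List.flatMap_append, ih, Nat.succ_mul, List.range_add,
      List.map_append, List.flatMap_singleton]
    congr 1
    rw [List.map_map]
    apply pvMapRangeCongr
    intro j hj
    have h1 : (A * B + j) / B = A := by
      rw [Nat.add_comm, Nat.add_mul_div_right _ _ hB, Nat.div_eq_of_lt hj]; omega
    have h2 : (A * B + j) % B = j := by
      rw [Nat.add_comm, Nat.add_mul_mod_self_right, Nat.mod_eq_of_lt hj]
    simp [h1, h2]

lemma pvRevMapRange {α : Type} (N : Nat) (f : Nat → α) :
    ((List.range N).map f).reverse = (List.range N).map (fun i => f (N - 1 - i)) := by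
  apply List.ext_getElem
  · simp
  · intro p h1 h2
    simp only [List.getElem_reverse, List.getElem_map, List.getElem_range,
      List.length_map, List.length_range]

lemma pvRangeCast (n : Int) :
    PySem.List.pyRange 0 n 1 = (List.range n.toNat).map (fun k : Nat => (k : Int)) := by
  rw [PySem.List.pyRange_one]
  simp only [zero_add, sub_zero]

lemma pvRangeCastDown (n : Int) :
    PySem.List.pyRange (n - 1) (-1) (-1)
      = (List.range n.toNat).map (fun k : Nat => n - 1 - (k : Int)) := by
  rw [PySem.List.pyRange_neg_one]
  have h : (n - 1 - (-1)).toNat = n.toNat := by omega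
  rw [h]

lemma pvEnumMapRange (M : Nat) (f : Nat → Int) :
    PySem.List.enumerate ((List.range M).map f) 0 = (List.range M).map (fun k : Nat => ((k : Int), f k)) := by
  rw [PySem.List.enumerate_eq_map_pyRange (d := 0)]
  have hl : PySem.List.len ((List.range M).map f) = (M : Int) := by simp
  rw [hl, pvRangeCast]
  simp only [Int.toNat_natCast, List.map_map]
  apply pvMapRangeCongr
  intro k hk
  simp [List.getElem?_range, hk]

lemma pvDictInv (M : Nat) (h g : Nat → Nat)
    (hh : ∀ k < M, h k < M) (hgh : ∀ k < M, g (h k) = k) (hhg : ∀ p < M, h (g p) = p)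
    (hg : ∀ p < M, g p < M) (i : Nat) (hi : i < M) :
    ((List.range M).foldl (fun (d : PySem.Dict Int Int) k => d.insert ((h k : Nat) : Int) ((k : Nat) : Int))
        PySem.Dict.empty).getD (i : Int) 0 = ((g i : Nat) : Int) := by
  have hinj : ∀ x ∈ List.range M, ∀ y ∈ List.range M,
      ((h x : Nat) : Int) = ((h y : Nat) : Int) → x = y := by
    intro x hx y hy hxy
    have hx' := List.mem_range.mp hx
    have hy' := List.mem_range.mp hy
    have : h x = h y := by exact_mod_cast hxy
    calc x = g (h x) := (hgh x hx').symm
      _ = g (h y) := by rw [this]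
      _ = y := hgh y hy'
  have hknd : ((List.range M).map (fun a => ((h a : Nat) : Int))).Nodup :=
    List.Nodup.map_on hinj (List.nodup_range)
  have hitems := PySem.Dict.items_foldl_insert_fresh (l := List.range M)
    (k := fun a => ((h a : Nat) : Int)) (v := fun a => ((a : Nat) : Int)) (d := PySem.Dict.empty)
    (by intro a _; simp [PySem.Dict.contains_empty]) hknd
  have hnd : ((List.range M).foldl (fun (d : PySem.Dict Int Int) k =>
      d.insert ((h k : Nat) : Int) ((k : Nat) : Int)) PySem.Dict.empty).keys.Nodup := by
    exact PySem.Dict.nodup_keys_foldl_insert_key (List.range M) (fun a => ((h a : Nat) : Int))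
      (fun _ a => ((a : Nat) : Int)) PySem.Dict.empty (by simp [PySem.Dict.keys_empty])
  beta_reduce at hitems
  have hmem : (((i : Nat) : Int), ((g i : Nat) : Int))
      ∈ ((List.range M).foldl (fun (d : PySem.Dict Int Int) k =>
          d.insert ((h k : Nat) : Int) ((k : Nat) : Int)) PySem.Dict.empty).items := by
    rw [hitems]
    simp only [List.mem_append, List.mem_map]
    right
    exact ⟨g i, List.mem_range.mpr (hg i hi), by rw [hhg i hi]⟩
  exact PySem.Dict.getD_of_mem_items _ hmem hnd 0

lemma pvModTwoCast (t : Nat) : PySem.Int.mod (t : Int) 2 = ((t % 2 : Nat) : Int) := by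
  rw [PySem.Int.mod_eq_emod_of_pos (by norm_num : (0:Int) < 2)]
  omega

lemma pvSetCell_natCast (m : List (List Int)) (i c : Nat) (v : Int) :
    pvSetCell m (i : Int) (c : Int) v = m.set i ((m.getD i []).set c v) := by
  simp [pvSetCell]

lemma pvRowLocal (l : List Nat) (i : Nat) (M : List (List Int)) (hi : i < M.length)
    (c : Nat → Nat) (v : Nat → Int) :
    l.foldl (fun m k => m.set i ((m.getD i []).set (c k) (v k))) M
      = M.set i (l.foldl (fun r k => r.set (c k) (v k)) (M.getD i [])) := by
  induction l generalizing M with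
  | nil =>
    simp only [List.foldl_nil]
    rw [List.getD_eq_getElem _ _ hi, List.set_getElem_self]
  | cons a l ih =>
    simp only [List.foldl_cons]
    have hlen : i < (M.set i ((M.getD i []).set (c a) (v a))).length := by simp [hi]
    rw [ih _ hlen]
    rw [List.getD_eq_getElem _ _ hlen, List.getElem_set_self, List.set_set]

lemma pvFoldRangeInvAux {σ : Type} (F : σ → Nat → σ) (S : Nat → σ) (N : Nat)
    (hstep : ∀ u < N, F (S u) u = S (u + 1)) (t : Nat) (ht : t ≤ N) :
    (List.range t).foldl F (S 0) = S t := by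
  induction t with
  | zero => simp
  | succ t ih =>
    rw [List.range_succ, List.foldl_append, ih (by omega)]
    simp only [List.foldl_cons, List.foldl_nil]
    exact hstep t (by omega)

def pvRow1 (N i : Nat) : List Int :=
  (List.range N).map (fun j => ((i * N + (if i % 2 = 0 then j else N - 1 - j) : Nat) : Int) + 1)

lemma pvZig1_eq (N : Nat) :
    pvZig1 (N : Int) = (List.range N).map (pvRow1 N) := by
  have hstep : ∀ u < N,
      (fun (st : List (List Int) × Int) (i : Nat) =>
        if PySem.Int.mod (i : Int) 2 == 0 then
          (List.range N).foldl
            (fun (st2 : List (List Int) × Int) (k : Nat) =>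
              (pvSetCell st2.1 (i : Int) (k : Int) st2.2, st2.2 + 1)) st
        else
          (List.range N).foldl
            (fun (st2 : List (List Int) × Int) (k : Nat) =>
              (pvSetCell st2.1 (i : Int) ((N : Int) - 1 - (k : Int)) st2.2, st2.2 + 1)) st)
        ((List.range N).map (fun i => if i < u then pvRow1 N i else List.replicate N (0 : Int)),
          (1 : Int) + ((u * N : Nat) : Int)) u
      = ((List.range N).map (fun i => if i < u + 1 then pvRow1 N i else List.replicate N (0 : Int)),
          (1 : Int) + (((u + 1) * N : Nat) : Int)) := by
    intro u hu
    have hrepl : ((List.range N).map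
        (fun i => if i < u then pvRow1 N i else List.replicate N (0 : Int))).getD u []
        = List.replicate N (0 : Int) := by
      rw [PySem.List.getD_map_range _ N u _ hu]; simp
    simp only []
    rw [pvModTwoCast]
    by_cases hu2 : u % 2 = 0
    · rw [hu2]
      simp only [Nat.cast_zero, show ((0 : Int) == 0) = true from rfl, if_true]
      rw [pvCounterFold (fun m k v => pvSetCell m (u : Int) (k : Int) v) N _ _]
      simp only [pvSetCell_natCast]
      rw [pvRowLocal (List.range N) u _ (by simp [hu]) (fun k => k)
        (fun k => 1 + ((u * N : Nat) : Int) + (k : Int))]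
      rw [hrepl]
      rw [pvScatter N (fun k => k) (fun p => p) (by intro k hk; simpa using hk)
        (by intro k _; rfl) (by intro p _; rfl) (by intro p hp; simpa using hp)
        _ _ (0 : Int) (by simp)]
      rw [pvSetMapRange N u hu]
      refine Prod.ext ?_ ?_
      · apply pvMapRangeCongr
        intro p hp
        by_cases hpu : p = u
        · subst hpu
          rw [if_pos rfl, if_pos (by omega)]
          unfold pvRow1
          apply pvMapRangeCongr
          intro q hq
          rw [if_pos hu2]
          push_cast
          ring
        · rw [if_neg hpu]
          by_cases hplt : p < u
          · rw [if_pos hplt, if_pos (by omega)]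
          · rw [if_neg hplt, if_neg (by omega)]
      · push_cast; ring
    · have hu2' : u % 2 = 1 := by omega
      rw [hu2']
      simp only [Nat.cast_one, show ((1 : Int) == 0) = false from rfl, Bool.false_eq_true, if_false]
      rw [PySem.List.foldl_congr_mem (List.range N) _
        (fun (st2 : List (List Int) × Int) (k : Nat) =>
          (pvSetCell st2.1 (u : Int) (((N - 1 - k : Nat)) : Int) st2.2, st2.2 + 1)) _
        (by
          intro acc k hk
          have hkN := List.mem_range.mp hk
          have hcast : (N : Int) - 1 - (k : Int) = ((N - 1 - k : Nat) : Int) := by omega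
          rw [hcast])]
      rw [pvCounterFold (fun m k v => pvSetCell m (u : Int) ((N - 1 - k : Nat) : Int) v) N _ _]
      simp only [pvSetCell_natCast]
      rw [pvRowLocal (List.range N) u _ (by simp [hu]) (fun k => N - 1 - k)
        (fun k => 1 + ((u * N : Nat) : Int) + (k : Int))]
      rw [hrepl]
      rw [pvScatter N (fun k => N - 1 - k) (fun p => N - 1 - p)
        (by intro k hk; show N - 1 - k < N; omega)
        (by intro k hk; show N - 1 - (N - 1 - k) = k; omega)
        (by intro p hp; show N - 1 - (N - 1 - p) = p; omega)
        (by intro p hp; show N - 1 - p < N; omega)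
        _ _ (0 : Int) (by simp)]
      rw [pvSetMapRange N u hu]
      refine Prod.ext ?_ ?_
      · apply pvMapRangeCongr
        intro p hp
        by_cases hpu : p = u
        · subst hpu
          rw [if_pos rfl, if_pos (by omega)]
          unfold pvRow1
          apply pvMapRangeCongr
          intro q hq
          rw [if_neg (by omega)]
          push_cast
          ring
        · rw [if_neg hpu]
          by_cases hplt : p < u
          · rw [if_pos hplt, if_pos (by omega)]
          · rw [if_neg hplt, if_neg (by omega)]
      · push_cast; ring
  unfold pvZig1
  rw [pvRangeCast, pvRangeCastDown]
  simp only [PySem.List.pyRepeat_singleton, Int.toNat_natCast, List.foldl_map, List.map_map, Function.comp_def]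
  have hfold := pvFoldRangeInvAux
    (F := fun (st : List (List Int) × Int) (i : Nat) =>
      if PySem.Int.mod (i : Int) 2 == 0 then
        (List.range N).foldl
          (fun (st2 : List (List Int) × Int) (k : Nat) =>
            (pvSetCell st2.1 (i : Int) (k : Int) st2.2, st2.2 + 1)) st
      else
        (List.range N).foldl
          (fun (st2 : List (List Int) × Int) (k : Nat) =>
            (pvSetCell st2.1 (i : Int) ((N : Int) - 1 - (k : Int)) st2.2, st2.2 + 1)) st)
    (S := fun t => ((List.range N).map
        (fun i => if i < t then pvRow1 N i else List.replicate N (0 : Int)),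
        (1 : Int) + ((t * N : Nat) : Int)))
    N hstep N le_rfl
  simp only [Nat.zero_mul, Nat.cast_zero, add_zero, Nat.not_lt_zero, if_false] at hfold
  rw [hfold]
  apply pvMapRangeCongr
  intro i hi
  rw [if_pos hi]

lemma pvColScatterAux (N u : Nat) (e d : Nat → Nat) (he : ∀ k < N, e k < N)
    (hed : ∀ k < N, d (e k) = k) (hde : ∀ i < N, e (d i) = i)
    (v : Nat → Int) (R : Nat → List Int) (t : Nat) (ht : t ≤ N) :
    (List.range t).foldl (fun m k => m.set (e k) ((m.getD (e k) []).set u (v k)))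
        ((List.range N).map R)
      = (List.range N).map (fun i => if d i < t then (R i).set u (v (d i)) else R i) := by
  induction t with
  | zero => simp
  | succ t ih =>
    rw [List.range_succ, List.foldl_append, ih (by omega)]
    simp only [List.foldl_cons, List.foldl_nil]
    have het : e t < N := he t (by omega)
    have hdet : d (e t) = t := hed t (by omega)
    rw [PySem.List.getD_map_range _ N (e t) _ het]
    rw [pvSetMapRange N (e t) het]
    apply pvMapRangeCongr
    intro i hi
    by_cases hie : i = e t
    · subst hie
      rw [if_pos rfl, hdet]
      rw [if_neg (by omega), if_pos (by omega)]
    · have hne : d i ≠ t := by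
        intro hdi
        exact hie ((hdi ▸ hde i hi).symm)
      rw [if_neg hie]
      by_cases h2 : d i < t
      · rw [if_pos h2, if_pos (by omega)]
      · rw [if_neg h2, if_neg (by omega)]

lemma pvColScatter (N u : Nat) (e d : Nat → Nat) (he : ∀ k < N, e k < N)
    (hed : ∀ k < N, d (e k) = k) (hde : ∀ i < N, e (d i) = i) (hd : ∀ i < N, d i < N)
    (v : Nat → Int) (R : Nat → List Int) :
    (List.range N).foldl (fun m k => m.set (e k) ((m.getD (e k) []).set u (v k)))
        ((List.range N).map R)
      = (List.range N).map (fun i => (R i).set u (v (d i))) := by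
  rw [pvColScatterAux N u e d he hed hde v R N le_rfl]
  exact pvMapRangeCongr _ _ _ (fun i hi => by rw [if_pos (hd i hi)])

def pvRow2 (N i : Nat) : List Int :=
  (List.range N).map (fun j => ((j * N + (if j % 2 = 0 then i else N - 1 - i) : Nat) : Int) + 1)

lemma pvZig2_eq (N : Nat) :
    pvZig2 (N : Int) = (List.range N).map (pvRow2 N) := by
  have hstep : ∀ u < N,
      (fun (st : List (List Int) × Int) (j : Nat) =>
        if PySem.Int.mod (j : Int) 2 == 0 then
          (List.range N).foldl
            (fun (st2 : List (List Int) × Int) (k : Nat) =>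
              (pvSetCell st2.1 (k : Int) (j : Int) st2.2, st2.2 + 1)) st
        else
          (List.range N).foldl
            (fun (st2 : List (List Int) × Int) (k : Nat) =>
              (pvSetCell st2.1 ((N : Int) - 1 - (k : Int)) (j : Int) st2.2, st2.2 + 1)) st)
        ((List.range N).map (fun i => (List.range N).map
            (fun j => if j < u then ((j * N + (if j % 2 = 0 then i else N - 1 - i) : Nat) : Int) + 1 else 0)),
          (1 : Int) + ((u * N : Nat) : Int)) u
      = ((List.range N).map (fun i => (List.range N).map
            (fun j => if j < u + 1 then ((j * N + (if j % 2 = 0 then i else N - 1 - i) : Nat) : Int) + 1 else 0)),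
          (1 : Int) + (((u + 1) * N : Nat) : Int)) := by
    intro u hu
    simp only []
    rw [pvModTwoCast]
    by_cases hu2 : u % 2 = 0
    · rw [hu2]
      simp only [Nat.cast_zero, show ((0 : Int) == 0) = true from rfl, if_true]
      rw [pvCounterFold (fun m k v => pvSetCell m (k : Int) (u : Int) v) N _ _]
      simp only [pvSetCell_natCast]
      rw [pvColScatter N u (fun k => k) (fun i => i) (by intro k hk; simpa using hk)
        (by intro k _; rfl) (by intro i _; rfl) (by intro i hi; simpa using hi)
        (fun k => 1 + ((u * N : Nat) : Int) + (k : Int)) _]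
      refine Prod.ext ?_ ?_
      · apply pvMapRangeCongr
        intro i hi
        rw [pvSetMapRange N u hu]
        apply pvMapRangeCongr
        intro j hj
        by_cases hju : j = u
        · subst hju
          rw [if_pos rfl, if_pos (by omega), if_pos hu2]
          push_cast
          ring
        · rw [if_neg hju]
          by_cases hjlt : j < u
          · rw [if_pos hjlt, if_pos (show j < u + 1 by omega)]
          · rw [if_neg hjlt, if_neg (show ¬ j < u + 1 by omega)]
      · push_cast; ring
    · have hu2' : u % 2 = 1 := by omega
      rw [hu2']
      simp only [Nat.cast_one, show ((1 : Int) == 0) = false from rfl, Bool.false_eq_true, if_false]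
      rw [PySem.List.foldl_congr_mem (List.range N) _
        (fun (st2 : List (List Int) × Int) (k : Nat) =>
          (pvSetCell st2.1 (((N - 1 - k : Nat)) : Int) (u : Int) st2.2, st2.2 + 1)) _
        (by
          intro acc k hk
          have hkN := List.mem_range.mp hk
          have hcast : (N : Int) - 1 - (k : Int) = ((N - 1 - k : Nat) : Int) := by omega
          rw [hcast])]
      rw [pvCounterFold (fun m k v => pvSetCell m ((N - 1 - k : Nat) : Int) (u : Int) v) N _ _]
      simp only [pvSetCell_natCast]
      rw [pvColScatter N u (fun k => N - 1 - k) (fun i => N - 1 - i)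
        (by intro k hk; show N - 1 - k < N; omega)
        (by intro k hk; show N - 1 - (N - 1 - k) = k; omega)
        (by intro i hi; show N - 1 - (N - 1 - i) = i; omega)
        (by intro i hi; show N - 1 - i < N; omega)
        (fun k => 1 + ((u * N : Nat) : Int) + (k : Int)) _]
      refine Prod.ext ?_ ?_
      · apply pvMapRangeCongr
        intro i hi
        rw [pvSetMapRange N u hu]
        apply pvMapRangeCongr
        intro j hj
        by_cases hju : j = u
        · subst hju
          rw [if_pos rfl, if_pos (by omega), if_neg (by omega)]
          push_cast
          ring
        · rw [if_neg hju]
          by_cases hjlt : j < u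
          · rw [if_pos hjlt, if_pos (show j < u + 1 by omega)]
          · rw [if_neg hjlt, if_neg (show ¬ j < u + 1 by omega)]
      · push_cast; ring
  unfold pvZig2
  rw [pvRangeCast, pvRangeCastDown]
  simp only [PySem.List.pyRepeat_singleton, Int.toNat_natCast, List.foldl_map, List.map_map,
    Function.comp_def]
  have h0 : (fun (_ : Nat) => List.replicate N (0 : Int))
      = (fun (_ : Nat) => (List.range N).map (fun _ : Nat => (0 : Int))) := by
    funext x
    rw [List.map_const', List.length_range]
  rw [h0]
  have hfold := pvFoldRangeInvAux
    (F := fun (st : List (List Int) × Int) (j : Nat) =>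
      if PySem.Int.mod (j : Int) 2 == 0 then
        (List.range N).foldl
          (fun (st2 : List (List Int) × Int) (k : Nat) =>
            (pvSetCell st2.1 (k : Int) (j : Int) st2.2, st2.2 + 1)) st
      else
        (List.range N).foldl
          (fun (st2 : List (List Int) × Int) (k : Nat) =>
            (pvSetCell st2.1 ((N : Int) - 1 - (k : Int)) (j : Int) st2.2, st2.2 + 1)) st)
    (S := fun t => ((List.range N).map (fun i => (List.range N).map
        (fun j => if j < t then ((j * N + (if j % 2 = 0 then i else N - 1 - i) : Nat) : Int) + 1 else 0)),
        (1 : Int) + ((t * N : Nat) : Int)))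
    N hstep N le_rfl
  simp only [Nat.zero_mul, Nat.cast_zero, add_zero, Nat.not_lt_zero, if_false] at hfold
  rw [hfold]
  apply pvMapRangeCongr
  intro i hi
  unfold pvRow2
  apply pvMapRangeCongr
  intro j hj
  rw [if_pos hj]

lemma pvRearrangeEq (N : Nat) (E : Nat → Nat → Int) :
    ((List.range N).map (fun i => (List.range N).map (E i))).foldl
        (fun r row => row.foldl (fun r2 num => r2 ++ [num - 1]) r) []
      = (List.range (N * N)).map (fun k => E (k / N) (k % N) - 1) := by
  simp only [PySem.List.foldl_append_singleton_eq_map]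
  rw [PySem.List.foldl_append_eq_flatMap]
  rw [List.flatMap_map]
  simp only [List.map_map, Function.comp_def]
  rw [pvFlatMapRange N N (fun i j => E i j - 1)]
  simp

lemma pvOriginalEq (M : Nat) (h g : Nat → Nat)
    (hh : ∀ k < M, h k < M) (hgh : ∀ k < M, g (h k) = k) (hhg : ∀ p < M, h (g p) = p)
    (hg : ∀ p < M, g p < M) :
    (PySem.List.pyRange 0 (PySem.List.len ((List.range M).map (fun k : Nat => ((h k : Nat) : Int)))) 1).map
        (fun i => ((PySem.List.enumerate ((List.range M).map (fun k : Nat => ((h k : Nat) : Int))) 0).foldl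
          (fun (d : PySem.Dict Int Int) p => d.insert p.2 p.1) PySem.Dict.empty).getD i 0)
      = (List.range M).map (fun p : Nat => ((g p : Nat) : Int)) := by
  have hl : PySem.List.len ((List.range M).map (fun k : Nat => ((h k : Nat) : Int))) = (M : Int) := by
    simp
  rw [hl, pvRangeCast, pvEnumMapRange M (fun k => ((h k : Nat) : Int))]
  simp only [Int.toNat_natCast, List.map_map, List.foldl_map, Function.comp_def]
  apply pvMapRangeCongr
  intro p hp
  exact pvDictInv M h g hh hgh hhg hg p hp

lemma pvOrderEq (M : Nat) (h g : Nat → Nat)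
    (hh : ∀ k < M, h k < M) (hgh : ∀ k < M, g (h k) = k) (hhg : ∀ p < M, h (g p) = p)
    (hg : ∀ p < M, g p < M) :
    (PySem.List.enumerate ((List.range M).map (fun k : Nat => ((h k : Nat) : Int))) 0).foldl
        (fun o (p : Int × Int) => PySem.List.pySetD o p.2 p.1)
        (PySem.List.pyRepeat [(0 : Int)]
          (PySem.List.len ((List.range M).map (fun k : Nat => ((h k : Nat) : Int)))))
      = (List.range M).map (fun p : Nat => ((g p : Nat) : Int)) := by
  have hl : PySem.List.len ((List.range M).map (fun k : Nat => ((h k : Nat) : Int))) = (M : Int) := by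
    simp
  rw [hl, pvEnumMapRange M (fun k => ((h k : Nat) : Int)), PySem.List.pyRepeat_singleton,
    Int.toNat_natCast]
  rw [List.foldl_map]
  simp only [PySem.List.pySetD_natCast]
  exact pvScatter M h g hh hgh hhg hg (fun k => ((k : Nat) : Int)) _ 0 (by simp)

lemma pvWalk1_eq (N : Nat) :
    ((PySem.List.pyRange 0 (N : Int) 1).foldl (fun w i =>
        if PySem.Int.mod i 2 == 0 then
          (PySem.List.pyRange 0 (N : Int) 1).foldl (fun w j => w ++ [i * (N : Int) + j]) w
        else
          (PySem.List.pyRange ((N : Int) - 1) (-1) (-1)).foldl (fun w j => w ++ [i * (N : Int) + j]) w)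
      ([] : List Int))
      = (List.range (N * N)).map (fun k : Nat => ((pvG1 N k : Nat) : Int)) := by
  rw [pvRangeCast, pvRangeCastDown]
  simp only [Int.toNat_natCast, List.foldl_map]
  rw [PySem.List.foldl_congr_mem (List.range N) _
    (fun (w : List Int) (i : Nat) => w ++ (List.range N).map
      (fun j : Nat => ((i * N + (if i % 2 = 0 then j else N - 1 - j) : Nat) : Int))) _
    (by
      intro w i hi
      have hiN := List.mem_range.mp hi
      simp only [List.foldl_map]
      by_cases hi2 : i % 2 = 0
      · rw [if_pos (by rw [pvModTwoCast, hi2]; rfl)]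
        rw [PySem.List.foldl_append_singleton_eq_map]
        congr 1
        apply pvMapRangeCongr
        intro j hj
        rw [if_pos hi2]
        push_cast
        ring
      · have hi2' : i % 2 = 1 := by omega
        rw [if_neg (by rw [pvModTwoCast, hi2']; simp)]
        rw [PySem.List.foldl_append_singleton_eq_map]
        congr 1
        apply pvMapRangeCongr
        intro j hj
        rw [if_neg hi2]
        have hc : ((N - 1 - j : Nat) : Int) = (N : Int) - 1 - (j : Int) := by omega
        push_cast [hc]
        ring)]
  rw [PySem.List.foldl_append_eq_flatMap]
  rw [pvFlatMapRange N N (fun i j => ((i * N + (if i % 2 = 0 then j else N - 1 - j) : Nat) : Int))]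
  simp [pvG1]

lemma pvWalk2_eq (N : Nat) :
    ((PySem.List.pyRange 0 (N : Int) 1).foldl (fun w j =>
        if PySem.Int.mod j 2 == 0 then
          (PySem.List.pyRange 0 (N : Int) 1).foldl (fun w i => w ++ [i * (N : Int) + j]) w
        else
          (PySem.List.pyRange ((N : Int) - 1) (-1) (-1)).foldl (fun w i => w ++ [i * (N : Int) + j]) w)
      ([] : List Int))
      = (List.range (N * N)).map (fun k : Nat => ((pvG2 N k : Nat) : Int)) := by
  rw [pvRangeCast, pvRangeCastDown]
  simp only [Int.toNat_natCast, List.foldl_map]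
  rw [PySem.List.foldl_congr_mem (List.range N) _
    (fun (w : List Int) (u : Nat) => w ++ (List.range N).map
      (fun t : Nat => (((if u % 2 = 0 then t else N - 1 - t) * N + u : Nat) : Int))) _
    (by
      intro w u hu
      have huN := List.mem_range.mp hu
      simp only [List.foldl_map]
      by_cases hu2 : u % 2 = 0
      · rw [if_pos (by rw [pvModTwoCast, hu2]; rfl)]
        rw [PySem.List.foldl_append_singleton_eq_map]
        congr 1
        apply pvMapRangeCongr
        intro t ht
        rw [if_pos hu2]
        push_cast
        ring
      · have hu2' : u % 2 = 1 := by omega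
        rw [if_neg (by rw [pvModTwoCast, hu2']; simp)]
        rw [PySem.List.foldl_append_singleton_eq_map]
        congr 1
        apply pvMapRangeCongr
        intro t ht
        rw [if_neg hu2]
        have hc : ((N - 1 - t : Nat) : Int) = (N : Int) - 1 - (t : Int) := by omega
        push_cast [hc]
        ring)]
  rw [PySem.List.foldl_append_eq_flatMap]
  rw [pvFlatMapRange N N (fun u t => (((if u % 2 = 0 then t else N - 1 - t) * N + u : Nat) : Int))]
  simp [pvG2]

lemma pvRotIdx (N a b : Nat) (ha : a < N) (hb : b < N) :
    (N - 1 - a) * N + (N - 1 - b) = N * N - 1 - (a * N + b) := by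
  have hab : a * N + b < N * N := by
    calc a * N + b < a * N + N := by omega
      _ = (a + 1) * N := by ring
      _ ≤ N * N := Nat.mul_le_mul_right N (by omega)
  zify [show a ≤ N - 1 by omega, show b ≤ N - 1 by omega, show 1 ≤ N by omega,
    show a * N + b ≤ N * N - 1 by omega, show 1 ≤ N * N by omega]
  ring

lemma pvZig7_eq (N : Nat) :
    pvZig7 (N : Int) = (List.range N).map (fun i => (List.range N).map
      (fun j => ((pvG1 N ((N - 1 - i) * N + (N - 1 - j)) : Nat) : Int) + 1)) := by
  unfold pvZig7 pvZig5
  rw [pvZig1_eq, pvRev_eq, pvRevMapRange, List.map_map]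
  apply pvMapRangeCongr
  intro i hi
  simp only [Function.comp_def]
  rw [pvRevRow_eq]
  unfold pvRow1
  rw [pvRevMapRange]
  apply pvMapRangeCongr
  intro j hj
  congr 2
  rw [pvG1_eval N (N - 1 - i) (N - 1 - j) (by omega)]

lemma pvZig8_eq (N : Nat) :
    pvZig8 (N : Int) = (List.range N).map (fun i => (List.range N).map
      (fun j => ((pvI2 N ((N - 1 - i) * N + (N - 1 - j)) : Nat) : Int) + 1)) := by
  unfold pvZig8 pvZig6
  rw [pvZig2_eq, pvRev_eq, pvRevMapRange, List.map_map]
  apply pvMapRangeCongr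
  intro i hi
  simp only [Function.comp_def]
  rw [pvRevRow_eq]
  unfold pvRow2
  rw [pvRevMapRange]
  apply pvMapRangeCongr
  intro j hj
  congr 2
  rw [pvI2_eval N (N - 1 - i) (N - 1 - j) (by omega)]

lemma pvRearr1 (N : Nat) :
    ((List.range N).map (pvRow1 N)).foldl
        (fun r row => row.foldl (fun r2 num => r2 ++ [num - 1]) r) []
      = (List.range (N * N)).map (fun k : Nat => ((pvG1 N k : Nat) : Int)) := by
  unfold pvRow1
  rw [pvRearrangeEq]
  apply pvMapRangeCongr
  intro k hk
  simp [pvG1]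

lemma pvRearr2 (N : Nat) :
    ((List.range N).map (pvRow2 N)).foldl
        (fun r row => row.foldl (fun r2 num => r2 ++ [num - 1]) r) []
      = (List.range (N * N)).map (fun k : Nat => ((pvI2 N k : Nat) : Int)) := by
  unfold pvRow2
  rw [pvRearrangeEq]
  apply pvMapRangeCongr
  intro k hk
  simp [pvI2]

lemma pvRearr7 (N : Nat) (hN : 0 < N) :
    ((List.range N).map (fun i => (List.range N).map
        (fun j => ((pvG1 N ((N - 1 - i) * N + (N - 1 - j)) : Nat) : Int) + 1))).foldl
        (fun r row => row.foldl (fun r2 num => r2 ++ [num - 1]) r) []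
      = (List.range (N * N)).map (fun k : Nat => ((pvG1 N (N * N - 1 - k) : Nat) : Int)) := by
  rw [pvRearrangeEq]
  apply pvMapRangeCongr
  intro k hk
  obtain ⟨ha, hb⟩ := pvDivLt N k hN hk
  rw [pvRotIdx N (k / N) (k % N) ha hb]
  have hdm : k / N * N + k % N = k := by rw [mul_comm]; exact Nat.div_add_mod k N
  rw [hdm]
  simp

lemma pvRearr8 (N : Nat) (hN : 0 < N) :
    ((List.range N).map (fun i => (List.range N).map
        (fun j => ((pvI2 N ((N - 1 - i) * N + (N - 1 - j)) : Nat) : Int) + 1))).foldl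
        (fun r row => row.foldl (fun r2 num => r2 ++ [num - 1]) r) []
      = (List.range (N * N)).map (fun k : Nat => ((pvI2 N (N * N - 1 - k) : Nat) : Int)) := by
  rw [pvRearrangeEq]
  apply pvMapRangeCongr
  intro k hk
  obtain ⟨ha, hb⟩ := pvDivLt N k hN hk
  rw [pvRotIdx N (k / N) (k % N) ha hb]
  have hdm : k / N * N + k % N = k := by rw [mul_comm]; exact Nat.div_add_mod k N
  rw [hdm]
  simp

lemma pvWmap (N : Nat) (hN : 0 < N) (f : Nat → Nat) (hf : ∀ k < N * N, f k < N * N) :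
    ((List.range (N * N)).map (fun k : Nat => ((f k : Nat) : Int))).map
        (fun p => (N : Int) * (N : Int) - 1 - p)
      = (List.range (N * N)).map (fun k : Nat => ((N * N - 1 - f k : Nat) : Int)) := by
  rw [List.map_map]
  apply pvMapRangeCongr
  intro k hk
  simp only [Function.comp_def]
  have h1 := hf k hk
  have h2 : ((N : Int) * N) = ((N * N : Nat) : Int) := by push_cast; ring
  rw [h2]
  omega

lemma pvMainPos (N : Nat) (hN : 0 < N) : vmamba_ (N : Int) = vmamba__alt (N : Int) := by
  have h1h : ∀ k < N * N, pvG1 N k < N * N := fun k hk => pvG1_lt N k hN hk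
  have h1i : ∀ k < N * N, pvG1 N (pvG1 N k) = k := fun k hk => pvG1_invol N k hN hk
  have h2h : ∀ k < N * N, pvG2 N k < N * N := fun k hk => pvG2_lt N k hN hk
  have hi2h : ∀ k < N * N, pvI2 N k < N * N := fun k hk => pvI2_lt N k hN hk
  have hgi : ∀ k < N * N, pvI2 N (pvG2 N k) = k := fun k hk => pvI2_G2 N k hN hk
  have hig : ∀ p < N * N, pvG2 N (pvI2 N p) = p := fun p hp => pvG2_I2 N p hN hp
  have hM : 0 < N * N := Nat.mul_pos hN hN
  have h7h : ∀ p < N * N, pvG1 N (N * N - 1 - p) < N * N := fun p hp => h1h _ (by omega)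
  have h7gh : ∀ p < N * N, N * N - 1 - pvG1 N (pvG1 N (N * N - 1 - p)) = p := by
    intro p hp
    rw [h1i _ (by omega)]
    omega
  have h7hg : ∀ k < N * N, pvG1 N (N * N - 1 - (N * N - 1 - pvG1 N k)) = k := by
    intro k hk
    have := h1h k hk
    rw [show N * N - 1 - (N * N - 1 - pvG1 N k) = pvG1 N k by omega]
    exact h1i k hk
  have h7g : ∀ k < N * N, N * N - 1 - pvG1 N k < N * N := fun k hk => by omega
  have h8h : ∀ p < N * N, pvI2 N (N * N - 1 - p) < N * N := fun p hp => hi2h _ (by omega)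
  have h8gh : ∀ p < N * N, N * N - 1 - pvG2 N (pvI2 N (N * N - 1 - p)) = p := by
    intro p hp
    rw [hig _ (by omega)]
    omega
  have h8hg : ∀ k < N * N, pvI2 N (N * N - 1 - (N * N - 1 - pvG2 N k)) = k := by
    intro k hk
    have := h2h k hk
    rw [show N * N - 1 - (N * N - 1 - pvG2 N k) = pvG2 N k by omega]
    exact hgi k hk
  have h8g : ∀ k < N * N, N * N - 1 - pvG2 N k < N * N := fun k hk => by omega
  unfold vmamba_ vmamba__alt
  simp only [List.foldl_cons, List.foldl_nil, List.nil_append]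
  rw [pvZig1_eq, pvZig2_eq, pvZig7_eq, pvZig8_eq]
  rw [pvRearr1, pvRearr2, pvRearr7 N hN, pvRearr8 N hN]
  rw [pvOriginalEq (N * N) (pvG1 N) (pvG1 N) h1h h1i h1i h1h]
  rw [pvOriginalEq (N * N) (pvI2 N) (pvG2 N) hi2h hig hgi h2h]
  rw [pvOriginalEq (N * N) (fun p => pvG1 N (N * N - 1 - p)) (fun k => N * N - 1 - pvG1 N k)
    h7h h7gh h7hg h7g]
  rw [pvOriginalEq (N * N) (fun p => pvI2 N (N * N - 1 - p)) (fun k => N * N - 1 - pvG2 N k)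
    h8h h8gh h8hg h8g]
  rw [pvWalk1_eq, pvWalk2_eq]
  rw [pvWmap N hN (pvG1 N) h1h, pvWmap N hN (pvG2 N) h2h]
  rw [pvOrderEq (N * N) (pvG1 N) (pvG1 N) h1h h1i h1i h1h]
  rw [pvOrderEq (N * N) (pvG2 N) (pvI2 N) h2h hgi hig hi2h]
  rw [pvOrderEq (N * N) (fun k => N * N - 1 - pvG1 N k) (fun p => pvG1 N (N * N - 1 - p))
    h7g h7hg h7gh h7h]
  rw [pvOrderEq (N * N) (fun k => N * N - 1 - pvG2 N k) (fun p => pvI2 N (N * N - 1 - p))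
    h8g h8hg h8gh h8h]

lemma pvMainNonpos (n : Int) (hn : n ≤ 0) : vmamba_ n = vmamba__alt n := by
  have hr : PySem.List.pyRange 0 n 1 = [] := PySem.List.pyRange_one_eq_nil hn
  have hr2 : PySem.List.pyRange (n - 1) (-1) (-1) = [] :=
    PySem.List.pyRange_neg_one_eq_nil (by omega)
  simp only [vmamba_, vmamba__alt, pvZig7, pvZig8, pvZig5, pvZig6, pvZig1, pvZig2]
  simp [hr, hr2, PySem.List.slice?_none_none_neg_one, PySem.List.enumerate,
    PySem.List.pyRange_one_eq_nil, pvRev, pvRevRow]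

-- ===== VERDICT (by name: the statement is the Claim_ definition above) =====
theorem vmamba__spec : Claim_equal_vmamba_ := by
  intro n _
  show vmamba_ n = vmamba__alt n
  by_cases hn : 0 < n
  · have h : n = ((n.toNat : Nat) : Int) := by omega
    rw [h]
    exact pvMainPos n.toNat (by omega)
  · exact pvMainNonpos n (by omega)
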